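-- pv_equiv track=rewrite | github.com/Arman-Alam-8694/CODEFORCES | 2000-C-Numeric String Template/code.py | solve
-- ===== SOURCE A (Python) =====
-- def solve(n,listt,m,stringg):
--     lengthh=len(stringg)
--     dictt={}
--     dicttt={}
--     if n!=lengthh:
--         return "NO"
--     for i in range(n):
--         if  stringg[i] not in dictt:
--             dictt[stringg[i]]=listt[i]
--         else:
--             if listt[i]!=dictt[stringg[i]]:
--                 return "NO"
--         if listt[i] not in dicttt:
--             dicttt[listt[i]]=stringg[i]
--         else:
--             if stringg[i]!=dicttt[listt[i]]:
--                 return "NO"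
--
--     return "YES"
-- ===== SOURCE B (Python) =====
-- def solve(n, listt, m, stringg):
--     if n != len(stringg):
--         return "NO"
--     prefix = listt[:n]
--     if len(set(zip(prefix, stringg))) == len(set(prefix)) == len(set(stringg)):
--         return "YES"
--     return "NO"
-- ===== Notes on version B (the rewrite author's own statement) =====
-- stated objective: idiomatic
-- what changed: Replaced the element-by-element scan maintaining forward and backward dictionaries with early exit by a single set-cardinality bijection test: the mapping is consistent iff the number of distinct (number, char) pairs equals the number of distinct numbers and the number of distinct chars.
-- outside the precondition, e.g. on solve(4, [1, 1, 0], 0, 'aaab'): A returns 'NO', B returns 'YES'; on solve(1, [], 1, 'a'): A raises IndexError, B returns 'NO'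
import Mathlib
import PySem

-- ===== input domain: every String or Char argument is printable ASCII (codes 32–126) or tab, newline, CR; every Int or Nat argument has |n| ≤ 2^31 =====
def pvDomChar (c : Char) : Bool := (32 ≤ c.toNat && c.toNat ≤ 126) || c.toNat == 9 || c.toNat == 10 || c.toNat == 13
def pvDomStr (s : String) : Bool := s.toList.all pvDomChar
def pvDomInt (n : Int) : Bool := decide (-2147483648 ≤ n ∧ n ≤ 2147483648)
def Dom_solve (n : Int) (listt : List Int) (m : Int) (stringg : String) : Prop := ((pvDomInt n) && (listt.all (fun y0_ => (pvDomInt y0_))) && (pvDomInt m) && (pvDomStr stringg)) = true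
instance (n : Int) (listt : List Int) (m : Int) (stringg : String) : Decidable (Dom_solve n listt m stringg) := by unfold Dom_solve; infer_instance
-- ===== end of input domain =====

-- B replaces A's two-dict early-exit scan by a set-cardinality bijection test (idiomatic; same cost).
-- ===== PORT A =====
-- the 'for i in range(n)' loop of A: dictt maps chars to numbers, dicttt maps numbers to chars
def solveLoopA (listt : List Int) (cs : List Char) (idxs : List Int)
    (dictt : PySem.Dict Char Int) (dicttt : PySem.Dict Int Char) : String :=
  match idxs with
  | [] => "YES"
  | i :: rest =>
    if dictt.contains (PySem.List.pyGetD cs i ' ') ∧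
       PySem.List.pyGetD listt i 0 ≠ dictt.getD (PySem.List.pyGetD cs i ' ') 0 then "NO"
    else if dicttt.contains (PySem.List.pyGetD listt i 0) ∧
       PySem.List.pyGetD cs i ' ' ≠ dicttt.getD (PySem.List.pyGetD listt i 0) ' ' then "NO"
    else
      solveLoopA listt cs rest
        (if dictt.contains (PySem.List.pyGetD cs i ' ') then dictt
         else dictt.insert (PySem.List.pyGetD cs i ' ') (PySem.List.pyGetD listt i 0))
        (if dicttt.contains (PySem.List.pyGetD listt i 0) then dicttt
         else dicttt.insert (PySem.List.pyGetD listt i 0) (PySem.List.pyGetD cs i ' '))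

def solve (n : Int) (listt : List Int) (m : Int) (stringg : String) : String :=
  let lengthh : Int := (stringg.toList.length : Int)
  if n ≠ lengthh then "NO"
  else solveLoopA listt stringg.toList (PySem.List.pyRange 0 n 1) PySem.Dict.empty PySem.Dict.empty

-- ===== PORT B =====
def solve_alt (n : Int) (listt : List Int) (m : Int) (stringg : String) : String :=
  if n ≠ (stringg.toList.length : Int) then "NO"
  else
    let pre := PySem.List.slice listt none (some n)
    if (PySem.Set.ofList (pre.zip stringg.toList)).length = (PySem.Set.ofList pre).length ∧
       (PySem.Set.ofList pre).length = (PySem.Set.ofList stringg.toList).length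
    then "YES" else "NO"

-- ===== PRECONDITION & SPEC =====
-- Pre_ excludes inputs with listt shorter than n (= len(stringg)); such an input is malformed (n is
-- the common length of listt and stringg) and A either raises IndexError there or happens to
-- early-exit with "NO" before reaching the missing index, while B judges the truncated zip.
def Pre_solve (n : Int) (listt : List Int) (m : Int) (stringg : String) : Prop :=
  n = (stringg.toList.length : Int) → stringg.toList.length ≤ listt.length
instance (n : Int) (listt : List Int) (m : Int) (stringg : String) : Decidable (Pre_solve n listt m stringg) := by unfold Pre_solve; infer_instance
def pvWitness_solve : Int × List Int × Int × String := (2, [5, 5], 0, "aa")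

def Spec_solve (n : Int) (listt : List Int) (m : Int) (stringg : String) (out : String) : Prop := out = solve_alt n listt m stringg
instance (n : Int) (listt : List Int) (m : Int) (stringg : String) (out : String) : Decidable (Spec_solve n listt m stringg out) := by unfold Spec_solve; infer_instance

-- ===== CLAIM (what is proved, stated in full; the proofs are below) =====
def Claim_equal_solve : Prop := ∀ (n : Int) (listt : List Int) (m : Int) (stringg : String), Dom_solve n listt m stringg → Pre_solve n listt m stringg → Spec_solve n listt m stringg (solve n listt m stringg)

-- ===== LEMMAS AND PROOFS =====

-- consistency of a list of (number, char) pairs: equal numbers iff equal chars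
def Good (P : List (Int × Char)) : Prop := ∀ p ∈ P, ∀ q ∈ P, (p.1 = q.1 ↔ p.2 = q.2)

-- A's loop rephrased over the pair list itself
def pairLoop (P : List (Int × Char)) (d1 : PySem.Dict Char Int) (d2 : PySem.Dict Int Char) : String :=
  match P with
  | [] => "YES"
  | (a, c) :: rest =>
    if d1.contains c ∧ a ≠ d1.getD c 0 then "NO"
    else if d2.contains a ∧ c ≠ d2.getD a ' ' then "NO"
    else pairLoop rest (if d1.contains c then d1 else d1.insert c a)
                       (if d2.contains a then d2 else d2.insert a c)

-- the two dicts hold exactly the pairs processed so far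
def InvAB (d1 : PySem.Dict Char Int) (d2 : PySem.Dict Int Char) (M : List (Int × Char)) : Prop :=
  (∀ a c, d1.get? c = some a ↔ (a, c) ∈ M) ∧ (∀ a c, d2.get? a = some c ↔ (a, c) ∈ M)

theorem good_of_mem_append (M : List (Int × Char)) (a : Int) (c : Char)
    (hG : Good M) (h : (a, c) ∈ M) : Good (M ++ [(a, c)]) := by
  intro p hp q hq
  simp only [List.mem_append, List.mem_singleton] at hp hq
  rcases hp with hp | hp <;> rcases hq with hq | hq
  · exact hG p hp q hq
  · subst hq; exact hG p hp (a, c) h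
  · subst hp; exact hG (a, c) h q hq
  · subst hp; subst hq; exact hG (a, c) h (a, c) h

theorem good_of_fresh (M : List (Int × Char)) (a : Int) (c : Char)
    (hG : Good M) (hf : ∀ ch, (a, ch) ∉ M) (hs : ∀ b, (b, c) ∉ M) :
    Good (M ++ [(a, c)]) := by
  intro p hp q hq
  simp only [List.mem_append, List.mem_singleton] at hp hq
  rcases hp with hp | hp <;> rcases hq with hq | hq
  · exact hG p hp q hq
  · subst hq
    have hpm : (p.1, p.2) ∈ M := by rwa [Prod.mk.eta]
    constructor
    · intro h1
      have h1' : p.1 = a := h1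
      exfalso; apply hf p.2; rw [← h1']; exact hpm
    · intro h2
      have h2' : p.2 = c := h2
      exfalso; apply hs p.1; rw [← h2']; exact hpm
  · subst hp
    have hqm : (q.1, q.2) ∈ M := by rwa [Prod.mk.eta]
    constructor
    · intro h1
      have h1' : a = q.1 := h1
      exfalso; apply hf q.2; rw [h1']; exact hqm
    · intro h2
      have h2' : c = q.2 := h2
      exfalso; apply hs q.1; rw [h2']; exact hqm
  · subst hp; subst hq; exact ⟨fun _ => rfl, fun _ => rfl⟩

theorem not_good_append (M P : List (Int × Char)) (p q : Int × Char)
    (hp : p ∈ M) (hq : q ∈ P) (h : ¬ (p.1 = q.1 ↔ p.2 = q.2)) : ¬ Good (M ++ P) := by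
  intro hGood
  exact h (hGood p (List.mem_append_left _ hp) q (List.mem_append_right _ hq))

theorem pairLoop_eq (P : List (Int × Char)) : ∀ (M : List (Int × Char))
    (d1 : PySem.Dict Char Int) (d2 : PySem.Dict Int Char),
    InvAB d1 d2 M → Good M →
    (Good (M ++ P) → pairLoop P d1 d2 = "YES") ∧
    (¬ Good (M ++ P) → pairLoop P d1 d2 = "NO") := by
  induction P with
  | nil =>
    intro M d1 d2 _ hG
    constructor
    · intro _; rfl
    · intro h; exact absurd (by rwa [List.append_nil]) h
  | cons pc rest ih =>
    obtain ⟨a, c⟩ := pc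
    intro M d1 d2 hInv hG
    obtain ⟨h1, h2⟩ := hInv
    by_cases hc : d1.contains c = true
    · -- c already a key of dictt
      rw [PySem.Dict.contains_eq_isSome_get?] at hc
      obtain ⟨a', hga⟩ := Option.isSome_iff_exists.mp hc
      have hc' : d1.contains c = true := by
        rw [PySem.Dict.contains_eq_isSome_get?, hga]; rfl
      have hmem : (a', c) ∈ M := (h1 a' c).mp hga
      have hgd : d1.getD c 0 = a' := by
        rw [PySem.Dict.getD_eq_get?_getD, hga]; rfl
      by_cases hne : a = a'
      · -- consistent value: (a, c) is already recorded in M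
        subst hne
        have hd2 : d2.get? a = some c := (h2 a c).mpr hmem
        have hd2c : d2.contains a = true := by
          rw [PySem.Dict.contains_eq_isSome_get?, hd2]; rfl
        have hgd2 : d2.getD a ' ' = c := by
          rw [PySem.Dict.getD_eq_get?_getD, hd2]; rfl
        have hInv' : InvAB d1 d2 (M ++ [(a, c)]) := by
          constructor
          · intro b ch
            rw [h1 b ch]
            simp only [List.mem_append, List.mem_singleton]
            constructor
            · exact Or.inl
            · rintro (h | h)
              · exact h
              · rw [Prod.mk.injEq] at h; rw [h.1, h.2]; exact hmem
          · intro b ch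
            rw [h2 b ch]
            simp only [List.mem_append, List.mem_singleton]
            constructor
            · exact Or.inl
            · rintro (h | h)
              · exact h
              · rw [Prod.mk.injEq] at h; rw [h.1, h.2]; exact hmem
        have hG' : Good (M ++ [(a, c)]) := good_of_mem_append M a c hG hmem
        have hno1 : ¬(d1.contains c = true ∧ a ≠ d1.getD c 0) := fun h => h.2 hgd.symm
        have hno2 : ¬(d2.contains a = true ∧ c ≠ d2.getD a ' ') := fun h => h.2 hgd2.symm
        have hstep : pairLoop ((a, c) :: rest) d1 d2 = pairLoop rest d1 d2 := by
          simp only [pairLoop]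
          rw [if_neg hno1, if_neg hno2, if_pos hc', if_pos hd2c]
        have ihr := ih (M ++ [(a, c)]) d1 d2 hInv' hG'
        have hEq : M ++ [(a, c)] ++ rest = M ++ (a, c) :: rest := by simp
        rw [hEq] at ihr
        rw [hstep]
        exact ihr
      · -- mismatch with the recorded value: "NO", and Good fails
        have hnG : ¬ Good (M ++ (a, c) :: rest) := by
          apply not_good_append M ((a, c) :: rest) (a', c) (a, c) hmem List.mem_cons_self
          intro hiff
          exact hne (hiff.mpr rfl).symm
        have hy1 : d1.contains c = true ∧ a ≠ d1.getD c 0 :=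
          ⟨hc', fun h => hne (by rw [← hgd]; exact h)⟩
        have hstep : pairLoop ((a, c) :: rest) d1 d2 = "NO" := by
          simp only [pairLoop]
          rw [if_pos hy1]
        exact ⟨fun hGood => absurd hGood hnG, fun _ => hstep⟩
    · -- c is a fresh key of dictt: no pair (·, c) in M
      have hgnone : d1.get? c = none := by
        cases hx : d1.get? c with
        | none => rfl
        | some v =>
          exfalso; apply hc
          rw [PySem.Dict.contains_eq_isSome_get?, hx]; rfl
      have hfreshc : ∀ b, (b, c) ∉ M := by
        intro b hb
        have := (h1 b c).mpr hb
        rw [hgnone] at this; simp at this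
      have hno1 : ¬(d1.contains c = true ∧ a ≠ d1.getD c 0) := fun h => hc h.1
      by_cases hd : d2.contains a = true
      · -- a already a key of dicttt, necessarily with a different char: "NO"
        rw [PySem.Dict.contains_eq_isSome_get?] at hd
        obtain ⟨c', hgc⟩ := Option.isSome_iff_exists.mp hd
        have hd' : d2.contains a = true := by
          rw [PySem.Dict.contains_eq_isSome_get?, hgc]; rfl
        have hmem2 : (a, c') ∈ M := (h2 a c').mp hgc
        have hgd2 : d2.getD a ' ' = c' := by
          rw [PySem.Dict.getD_eq_get?_getD, hgc]; rfl
        have hcc : c ≠ c' := by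
          intro h; subst h; exact hfreshc a hmem2
        have hnG : ¬ Good (M ++ (a, c) :: rest) := by
          apply not_good_append M ((a, c) :: rest) (a, c') (a, c) hmem2 List.mem_cons_self
          intro hiff
          exact hcc (hiff.mp rfl).symm
        have hy2 : d2.contains a = true ∧ c ≠ d2.getD a ' ' :=
          ⟨hd', fun h => hcc (by rw [← hgd2]; exact h)⟩
        have hstep : pairLoop ((a, c) :: rest) d1 d2 = "NO" := by
          simp only [pairLoop]
          rw [if_neg hno1, if_pos hy2]
        exact ⟨fun hGood => absurd hGood hnG, fun _ => hstep⟩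
      · -- both fresh: record the new pair in both dicts
        have hgnone2 : d2.get? a = none := by
          cases hx : d2.get? a with
          | none => rfl
          | some v =>
            exfalso; apply hd
            rw [PySem.Dict.contains_eq_isSome_get?, hx]; rfl
        have hfresha : ∀ ch, (a, ch) ∉ M := by
          intro ch hb
          have := (h2 a ch).mpr hb
          rw [hgnone2] at this; simp at this
        have hno2 : ¬(d2.contains a = true ∧ c ≠ d2.getD a ' ') := fun h => hd h.1
        have hInv' : InvAB (d1.insert c a) (d2.insert a c) (M ++ [(a, c)]) := by
          constructor
          · intro b ch
            rw [PySem.Dict.get?_insert]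
            simp only [List.mem_append, List.mem_singleton]
            by_cases hch : ch = c
            · subst hch
              rw [if_pos rfl]
              simp only [Option.some.injEq]
              constructor
              · intro h; exact Or.inr (by rw [← h])
              · rintro (h | h)
                · exact absurd h (hfreshc b)
                · rw [Prod.mk.injEq] at h; rw [h.1]
            · rw [if_neg hch, h1 b ch]
              constructor
              · exact Or.inl
              · rintro (h | h)
                · exact h
                · rw [Prod.mk.injEq] at h; exact absurd h.2 hch
          · intro b ch
            rw [PySem.Dict.get?_insert]
            simp only [List.mem_append, List.mem_singleton]
            by_cases hb : b = a
            · subst hb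
              rw [if_pos rfl]
              simp only [Option.some.injEq]
              constructor
              · intro h; exact Or.inr (by rw [← h])
              · rintro (h | h)
                · exact absurd h (hfresha ch)
                · rw [Prod.mk.injEq] at h; rw [h.2]
            · rw [if_neg hb, h2 b ch]
              constructor
              · exact Or.inl
              · rintro (h | h)
                · exact h
                · rw [Prod.mk.injEq] at h; exact absurd h.1 hb
        have hG' : Good (M ++ [(a, c)]) := good_of_fresh M a c hG hfresha hfreshc
        have hstep : pairLoop ((a, c) :: rest) d1 d2
            = pairLoop rest (d1.insert c a) (d2.insert a c) := by
          simp only [pairLoop]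
          rw [if_neg hno1, if_neg hno2, if_neg hc, if_neg hd]
        have ihr := ih (M ++ [(a, c)]) _ _ hInv' hG'
        have hEq : M ++ [(a, c)] ++ rest = M ++ (a, c) :: rest := by simp
        rw [hEq] at ihr
        rw [hstep]
        exact ihr

theorem loopA_eq_pairLoop (listt : List Int) (cs : List Char) (N : Nat)
    (hN : cs.length = N) (hL : N ≤ listt.length) :
    ∀ (fuel k : Nat), N - k = fuel → k ≤ N → ∀ d1 d2,
    solveLoopA listt cs (PySem.List.pyRange (k : Int) (N : Int) 1) d1 d2
      = pairLoop (((listt.take N).zip cs).drop k) d1 d2 := by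
  intro fuel
  induction fuel with
  | zero =>
    intro k hfk hk d1 d2
    have hkN : k = N := by omega
    subst hkN
    rw [PySem.List.pyRange_one_eq_nil (le_refl _)]
    have hlen : ((listt.take k).zip cs).length ≤ k := by
      simp only [List.length_zip, List.length_take]
      omega
    rw [List.drop_eq_nil_of_le hlen]
    rfl
  | succ f ihf =>
    intro k hfk hk d1 d2
    have hkN : k < N := by omega
    have hkc : k < cs.length := by omega
    have hkl : k < listt.length := by omega
    rw [PySem.List.pyRange_one_cons (by exact_mod_cast hkN)]
    have hzlen : k < ((listt.take N).zip cs).length := by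
      simp only [List.length_zip, List.length_take, hN]
      omega
    have hzdrop : ((listt.take N).zip cs).drop k
        = (listt[k], cs[k]) :: ((listt.take N).zip cs).drop (k + 1) := by
      rw [List.drop_eq_getElem_cons hzlen]
      congr 1
      simp [List.getElem_zip, List.getElem_take]
    rw [hzdrop]
    have hca : PySem.List.pyGetD cs ((k : Nat) : Int) ' ' = cs[k] := by
      rw [PySem.List.pyGetD_natCast, List.getD_eq_getElem cs ' ' hkc]
    have haa : PySem.List.pyGetD listt ((k : Nat) : Int) 0 = listt[k] := by
      rw [PySem.List.pyGetD_natCast, List.getD_eq_getElem listt 0 hkl]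
    have hrec : ∀ d1' d2',
        solveLoopA listt cs (PySem.List.pyRange ((k : Int) + 1) (N : Int) 1) d1' d2'
          = pairLoop (((listt.take N).zip cs).drop (k + 1)) d1' d2' := by
      intro d1' d2'
      have := ihf (k + 1) (by omega) (by omega) d1' d2'
      rwa [Nat.cast_add, Nat.cast_one] at this
    simp only [solveLoopA, pairLoop, hca, haa]
    split_ifs <;> first | rfl | apply hrec

theorem setLen {α : Type} [DecidableEq α] [BEq α] [LawfulBEq α] (xs : List α) :
    (PySem.Set.ofList xs).length = xs.toFinset.card := by
  have hnd : (PySem.Set.ofList xs).Nodup := PySem.Set.nodup_ofList xs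
  have hts : (PySem.Set.ofList xs).toFinset = xs.toFinset := by
    ext x; simp [PySem.Set.mem_ofList]
  rw [← hts, List.toFinset_card_of_nodup hnd]

theorem card_iff_good (P : List (Int × Char)) :
    ((PySem.Set.ofList P).length = (PySem.Set.ofList (P.map Prod.fst)).length ∧
     (PySem.Set.ofList (P.map Prod.fst)).length = (PySem.Set.ofList (P.map Prod.snd)).length)
    ↔ Good P := by
  have himg : ∀ {β : Type} [DecidableEq β] (f : Int × Char → β),
      (P.map f).toFinset = P.toFinset.image f := by
    intro β _ f; ext x; simp
  rw [setLen, setLen, setLen, himg Prod.fst, himg Prod.snd]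
  constructor
  · rintro ⟨hA, hB⟩
    have hf : Set.InjOn Prod.fst (P.toFinset : Set (Int × Char)) := Finset.card_image_iff.mp hA.symm
    have hs : Set.InjOn Prod.snd (P.toFinset : Set (Int × Char)) := Finset.card_image_iff.mp (by omega)
    intro p hp q hq
    have hp' : p ∈ (P.toFinset : Set (Int × Char)) := by simpa using hp
    have hq' : q ∈ (P.toFinset : Set (Int × Char)) := by simpa using hq
    constructor
    · intro h; rw [hf hp' hq' h]
    · intro h; rw [hs hp' hq' h]
  · intro hG
    have hf : Set.InjOn Prod.fst (P.toFinset : Set (Int × Char)) := by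
      intro p hp q hq h
      have hp' : p ∈ P := by simpa using hp
      have hq' : q ∈ P := by simpa using hq
      exact Prod.ext h ((hG p hp' q hq').mp h)
    have hs : Set.InjOn Prod.snd (P.toFinset : Set (Int × Char)) := by
      intro p hp q hq h
      have hp' : p ∈ P := by simpa using hp
      have hq' : q ∈ P := by simpa using hq
      exact Prod.ext ((hG p hp' q hq').mpr h) h
    rw [Finset.card_image_of_injOn hf, Finset.card_image_of_injOn hs]
    exact ⟨rfl, rfl⟩

theorem invAB_empty : InvAB PySem.Dict.empty PySem.Dict.empty [] := by
  constructor <;> intro a c <;> simp [PySem.Dict.get?_empty]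

-- ===== VERDICT (by name: the statement is the Claim_ definition above) =====
theorem solve_spec : Claim_equal_solve := by
  intro n listt m stringg _ hpre
  unfold Spec_solve solve solve_alt
  by_cases hn : n = (stringg.toList.length : Int)
  · have hL : stringg.toList.length ≤ listt.length := hpre hn
    subst hn
    show (if ((stringg.toList.length : Int)) ≠ ((stringg.toList.length : Int)) then "NO"
          else solveLoopA listt stringg.toList
            (PySem.List.pyRange 0 ((stringg.toList.length : Int)) 1)
            PySem.Dict.empty PySem.Dict.empty)
       = (if ((stringg.toList.length : Int)) ≠ ((stringg.toList.length : Int)) then "NO"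
          else if (PySem.Set.ofList ((PySem.List.slice listt none
                    (some ((stringg.toList.length : Int)))).zip stringg.toList)).length
                  = (PySem.Set.ofList (PySem.List.slice listt none
                    (some ((stringg.toList.length : Int))))).length ∧
                  (PySem.Set.ofList (PySem.List.slice listt none
                    (some ((stringg.toList.length : Int))))).length
                  = (PySem.Set.ofList stringg.toList).length
               then "YES" else "NO")
    rw [if_neg (by simp), if_neg (by simp)]
    rw [show (0 : Int) = ((0 : Nat) : Int) by norm_num]
    rw [loopA_eq_pairLoop listt stringg.toList stringg.toList.length rfl hL
      stringg.toList.length 0 (by omega) (by omega) PySem.Dict.empty PySem.Dict.empty]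
    rw [List.drop_zero]
    have hPL := pairLoop_eq ((listt.take stringg.toList.length).zip stringg.toList) []
      PySem.Dict.empty PySem.Dict.empty invAB_empty (by intro p hp; simp at hp)
    simp only [List.nil_append] at hPL
    rw [PySem.List.slice_to_natCast listt stringg.toList.length]
    have hlt : (listt.take stringg.toList.length).length = stringg.toList.length := by
      simp only [List.length_take]; omega
    have hmf : ((listt.take stringg.toList.length).zip stringg.toList).map Prod.fst
        = listt.take stringg.toList.length :=
      List.map_fst_zip (by rw [hlt])
    have hms : ((listt.take stringg.toList.length).zip stringg.toList).map Prod.snd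
        = stringg.toList :=
      List.map_snd_zip (by rw [hlt])
    have key := card_iff_good ((listt.take stringg.toList.length).zip stringg.toList)
    rw [hmf, hms] at key
    by_cases hg : Good ((listt.take stringg.toList.length).zip stringg.toList)
    · rw [hPL.1 hg, if_pos (key.mpr hg)]
    · rw [hPL.2 hg, if_neg (fun h => hg (key.mp h))]
  · rw [if_pos hn, if_pos hn]
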